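-- pv_equiv track=rewrite | github.com/iamkanguk97/Algorithm | BOJ/Implementation/1195/1195.py | gear
-- ===== SOURCE A (Python) =====
-- def gear(gear1, gear2):
--   result = 10000
--
--   for i in range(len(gear1)):
--     if gear1[i] != 2 and gear2[0] != 2:   # gear2를 gear1에 맞출 수 있을 때
--       made = True
--       for j in range(1, len(gear2)):
--         idx = i + j
--         if idx >= len(gear1):
--           break
--         else:
--           if gear1[idx] == gear2[j]:   # gear1의 블록과 gear2의 블록이 같음
--             if gear2[j] == 2:   # 둘다 2면 안됨
--               made = False
--               break
--       if made == True:
--         temp = len(gear1[i:])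
--         if temp >= len(gear2):
--           result = len(gear1)
--         else:
--           result = i + len(gear2)
--         break
--   return result
-- ===== SOURCE B (Python) =====
-- def gear(gear1, gear2):
--     n, m = len(gear1), len(gear2)
--     if n == 0 or (m > 0 and gear2[0] == 2):
--         return 10000
--     twos1 = [p for p, v in enumerate(gear1) if v == 2]
--     bad = set(twos1)
--     for j in range(1, m):
--         if gear2[j] == 2:
--             for p in twos1:
--                 if p >= j:
--                     bad.add(p - j)
--     for i in range(n):
--         if i not in bad:
--             return n if n - i >= m else i + m
--     return 10000
-- ===== Notes on version B (the rewrite author's own statement) =====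
-- stated objective: alternative
-- what changed: Instead of testing every alignment i with an inner scan of gear2, B precomputes the positions of 2s in gear1, derives the set of forbidden shifts from pairs of 2-positions (p in gear1, j in gear2 gives forbidden shift p-j), and then takes the first shift i not in that set.
-- crash fix: When gear2 is empty and gear1 contains a non-2 value, A raises IndexError on gear2[0]; B returns len(gear1) (the alignment succeeds trivially with an empty gear2). — e.g. on gear([1], []): A raises IndexError, B returns 1
import Mathlib
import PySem

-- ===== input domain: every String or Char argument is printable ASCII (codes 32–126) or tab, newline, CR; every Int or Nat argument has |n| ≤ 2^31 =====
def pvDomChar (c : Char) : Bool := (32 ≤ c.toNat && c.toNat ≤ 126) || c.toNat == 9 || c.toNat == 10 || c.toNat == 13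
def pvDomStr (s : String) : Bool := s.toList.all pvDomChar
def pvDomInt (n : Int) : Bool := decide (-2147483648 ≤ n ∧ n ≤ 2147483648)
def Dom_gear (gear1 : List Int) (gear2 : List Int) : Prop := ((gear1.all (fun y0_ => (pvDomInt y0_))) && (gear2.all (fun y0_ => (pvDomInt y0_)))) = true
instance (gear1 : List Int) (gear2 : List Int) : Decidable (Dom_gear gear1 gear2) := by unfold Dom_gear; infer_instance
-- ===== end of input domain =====

-- B replaces A's per-alignment inner scan by a precomputed set of forbidden shifts
-- built from the positions of 2s in both gears (objective: alternative algorithm).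

-- ===== PORT A =====
-- inner 'for j in range(1, len(gear2))' loop computing 'made' (break ⇒ stop recursing)
def gearInner (gear1 gear2 : List Int) (i : Int) : List Int → Bool
  | [] => true
  | j :: js =>
    if (gear1.length : Int) ≤ i + j then true
    else
      if PySem.List.pyGetD gear1 (i + j) 0 = PySem.List.pyGetD gear2 j 0 then
        if PySem.List.pyGetD gear2 j 0 = 2 then false
        else gearInner gear1 gear2 i js
      else gearInner gear1 gear2 i js

-- outer 'for i in range(len(gear1))' loop; result stays 10000 unless the break fires
def gearOuter (gear1 gear2 : List Int) : List Int → Int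
  | [] => 10000
  | i :: is =>
    if PySem.List.pyGetD gear1 i 0 ≠ 2 ∧ PySem.List.pyGetD gear2 0 0 ≠ 2 then
      if gearInner gear1 gear2 i (PySem.List.pyRange 1 (gear2.length : Int) 1) then
        if (gear2.length : Int) ≤ ((PySem.List.slice gear1 (some i) none).length : Int) then
          (gear1.length : Int)
        else i + (gear2.length : Int)
      else gearOuter gear1 gear2 is
    else gearOuter gear1 gear2 is

def gear (gear1 : List Int) (gear2 : List Int) : Int :=
  gearOuter gear1 gear2 (PySem.List.pyRange 0 (gear1.length : Int) 1)

-- ===== PORT B =====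
-- twos1 = [p for p, v in enumerate(gear1) if v == 2]
def gearTwos1 (gear1 : List Int) : List Int :=
  ((PySem.List.enumerate gear1 0).filter (fun pv => pv.2 == 2)).map (fun pv => pv.1)

-- bad = set(twos1) extended with every forbidden shift p - j
def gearBad (gear1 gear2 : List Int) : PySem.Set Int :=
  (PySem.List.pyRange 1 (gear2.length : Int) 1).foldl
    (fun s j =>
      if PySem.List.pyGetD gear2 j 0 = 2 then
        (gearTwos1 gear1).foldl (fun s p => if j ≤ p then PySem.Set.add s (p - j) else s) s
      else s)
    (PySem.Set.ofList (gearTwos1 gear1))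

-- 'for i in range(n): if i not in bad: return …' / fall through to 10000
def gearAltScan (n m : Int) (bad : PySem.Set Int) : List Int → Int
  | [] => 10000
  | i :: is =>
    if PySem.Set.contains bad i then gearAltScan n m bad is
    else if m ≤ n - i then n else i + m

def gear_alt (gear1 : List Int) (gear2 : List Int) : Int :=
  let n : Int := gear1.length
  let m : Int := gear2.length
  if n = 0 ∨ (0 < m ∧ PySem.List.pyGetD gear2 0 0 = 2) then 10000
  else gearAltScan n m (gearBad gear1 gear2) (PySem.List.pyRange 0 n 1)

-- ===== PRECONDITION & SPEC =====
-- Pre_ excludes exactly the inputs where A raises: gear2 empty while gear1 has a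
-- non-2 entry makes A evaluate gear2[0] → IndexError.
def Pre_gear (gear1 : List Int) (gear2 : List Int) : Prop :=
  gear2 ≠ [] ∨ ∀ x ∈ gear1, x = 2
instance (gear1 : List Int) (gear2 : List Int) : Decidable (Pre_gear gear1 gear2) := by
  unfold Pre_gear; infer_instance
def pvWitness_gear : List Int × List Int := ([1, 2, 1], [1, 1])

-- When gear2 is empty and gear1 contains a non-2 value, A raises IndexError on
-- gear2[0]; B returns len(gear1) (the alignment succeeds trivially with an empty gear2).
def Raises_gear (gear1 : List Int) (gear2 : List Int) : Prop :=
  gear2 = [] ∧ ∃ x ∈ gear1, x ≠ 2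
instance (gear1 : List Int) (gear2 : List Int) : Decidable (Raises_gear gear1 gear2) := by
  unfold Raises_gear; infer_instance
def pvRaiseWitness_gear : List Int × List Int := ([1], [])
def pvRaiseWitnessOut_gear : Int := 1

def Spec_gear (gear1 : List Int) (gear2 : List Int) (out : Int) : Prop := out = gear_alt gear1 gear2
instance (gear1 : List Int) (gear2 : List Int) (out : Int) : Decidable (Spec_gear gear1 gear2 out) := by unfold Spec_gear; infer_instance

-- ===== CLAIM (what is proved, stated in full; the proofs are below) =====
def Claim_equal_gear : Prop := ∀ (gear1 : List Int) (gear2 : List Int), Dom_gear gear1 gear2 → Pre_gear gear1 gear2 → Spec_gear gear1 gear2 (gear gear1 gear2)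
def Claim_raises_gear : Prop := (∀ (gear1 : List Int) (gear2 : List Int), Dom_gear gear1 gear2 → Raises_gear gear1 gear2 → ¬ Pre_gear gear1 gear2) ∧ (Dom_gear (pvRaiseWitness_gear.1) (pvRaiseWitness_gear.2) ∧ Raises_gear (pvRaiseWitness_gear.1) (pvRaiseWitness_gear.2) ∧ gear_alt (pvRaiseWitness_gear.1) (pvRaiseWitness_gear.2) = pvRaiseWitnessOut_gear)

-- ===== LEMMAS AND PROOFS =====

-- membership in twos1: the in-range indices where gear1 holds a 2
theorem mem_gearTwos1 (gear1 : List Int) (p : Int) :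
    p ∈ gearTwos1 gear1 ↔ 0 ≤ p ∧ p < (gear1.length : Int) ∧ PySem.List.pyGetD gear1 p 0 = 2 := by
  simp only [gearTwos1, List.mem_map, List.mem_filter, PySem.List.mem_enumerate_iff, beq_iff_eq]
  constructor
  · rintro ⟨pv, ⟨⟨k, hk, rfl⟩, hb⟩, rfl⟩
    simp only [zero_add] at hb ⊢
    refine ⟨by positivity, by exact_mod_cast hk, ?_⟩
    rw [PySem.List.pyGetD_natCast]
    simpa [List.getD_eq_getElem?_getD, hk] using hb
  · rintro ⟨h0, hlt, hv⟩
    have hpn : ((p.toNat : Int)) = p := Int.toNat_of_nonneg h0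
    have hklt : p.toNat < gear1.length := by omega
    refine ⟨(p, gear1[p.toNat]), ⟨⟨p.toNat, hklt, by simp [hpn]⟩, ?_⟩, rfl⟩
    rw [← PySem.List.pyGetD_eq_getElem gear1 (0:Int) h0 hlt]
    exact hv

-- membership through the inner foldl that adds the shifts p - j
theorem mem_innerFold (twos : List Int) (j : Int) (s : PySem.Set Int) (x : Int) :
    x ∈ twos.foldl (fun s p => if j ≤ p then PySem.Set.add s (p - j) else s) s ↔
      x ∈ s ∨ ∃ p ∈ twos, j ≤ p ∧ x = p - j := by
  induction twos generalizing s with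
  | nil => simp
  | cons a t ih =>
    simp only [List.foldl_cons]
    by_cases h : j ≤ a
    · rw [if_pos h, ih]
      simp only [PySem.Set.mem_add, List.mem_cons]
      constructor
      · rintro ((hs | rfl) | ⟨p, hp, hj, rfl⟩)
        · exact Or.inl hs
        · exact Or.inr ⟨a, Or.inl rfl, h, rfl⟩
        · exact Or.inr ⟨p, Or.inr hp, hj, rfl⟩
      · rintro (hs | ⟨p, (rfl | hp), hj, rfl⟩)
        · exact Or.inl (Or.inl hs)
        · exact Or.inl (Or.inr rfl)
        · exact Or.inr ⟨p, hp, hj, rfl⟩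
    · rw [if_neg h, ih]
      constructor
      · rintro (hs | ⟨p, hp, hj, rfl⟩)
        · exact Or.inl hs
        · exact Or.inr ⟨p, List.mem_cons_of_mem _ hp, hj, rfl⟩
      · rintro (hs | ⟨p, hp, hj, rfl⟩)
        · exact Or.inl hs
        · rcases List.mem_cons.mp hp with rfl | hp
          · exact absurd hj h
          · exact Or.inr ⟨p, hp, hj, rfl⟩

-- membership through the outer foldl over the candidate j's
theorem mem_outerFold (gear1 gear2 : List Int) (L : List Int) (s : PySem.Set Int) (x : Int) :
    x ∈ L.foldl (fun s j =>
        if PySem.List.pyGetD gear2 j 0 = 2 then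
          (gearTwos1 gear1).foldl (fun s p => if j ≤ p then PySem.Set.add s (p - j) else s) s
        else s) s ↔
      x ∈ s ∨ ∃ j ∈ L, PySem.List.pyGetD gear2 j 0 = 2 ∧
        ∃ p ∈ gearTwos1 gear1, j ≤ p ∧ x = p - j := by
  induction L generalizing s with
  | nil => simp
  | cons a t ih =>
    simp only [List.foldl_cons]
    by_cases h : PySem.List.pyGetD gear2 a 0 = 2
    · rw [if_pos h, ih]
      simp only [mem_innerFold, List.mem_cons]
      constructor
      · rintro ((hs | ⟨p, hp, hj, rfl⟩) | ⟨j, hj, h2, q⟩)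
        · exact Or.inl hs
        · exact Or.inr ⟨a, Or.inl rfl, h, p, hp, hj, rfl⟩
        · exact Or.inr ⟨j, Or.inr hj, h2, q⟩
      · rintro (hs | ⟨j, (rfl | hj), h2, q⟩)
        · exact Or.inl (Or.inl hs)
        · exact Or.inl (Or.inr q)
        · exact Or.inr ⟨j, hj, h2, q⟩
    · rw [if_neg h, ih]
      constructor
      · rintro (hs | ⟨j, hj, h2, q⟩)
        · exact Or.inl hs
        · exact Or.inr ⟨j, List.mem_cons_of_mem _ hj, h2, q⟩
      · rintro (hs | ⟨j, hj, h2, q⟩)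
        · exact Or.inl hs
        · rcases List.mem_cons.mp hj with rfl | hj
          · exact absurd h2 h
          · exact Or.inr ⟨j, hj, h2, q⟩

-- membership in bad
theorem mem_gearBad (gear1 gear2 : List Int) (x : Int) :
    x ∈ gearBad gear1 gear2 ↔
      x ∈ gearTwos1 gear1 ∨
      ∃ j, 1 ≤ j ∧ j < (gear2.length : Int) ∧ PySem.List.pyGetD gear2 j 0 = 2 ∧
        ∃ p ∈ gearTwos1 gear1, j ≤ p ∧ x = p - j := by
  rw [gearBad, mem_outerFold]
  simp only [PySem.Set.mem_ofList, PySem.List.mem_pyRange_one]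
  constructor
  · rintro (hs | ⟨j, ⟨h1, h2⟩, h3, q⟩)
    · exact Or.inl hs
    · exact Or.inr ⟨j, h1, h2, h3, q⟩
  · rintro (hs | ⟨j, h1, h2, h3, q⟩)
    · exact Or.inl hs
    · exact Or.inr ⟨j, ⟨h1, h2⟩, h3, q⟩

-- A's inner loop, characterised: 'made' stays true iff no both-2 overlap at shift i
theorem gearInner_iff (gear1 gear2 : List Int) (i j0 : Int) :
    gearInner gear1 gear2 i (PySem.List.pyRange j0 (gear2.length : Int) 1) = true ↔
      ∀ j, j0 ≤ j → j < (gear2.length : Int) → i + j < (gear1.length : Int) →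
        ¬(PySem.List.pyGetD gear1 (i + j) 0 = 2 ∧ PySem.List.pyGetD gear2 j 0 = 2) := by
  by_cases hle : (gear2.length : Int) ≤ j0
  · rw [PySem.List.pyRange_one_eq_nil hle]
    simp only [gearInner, true_iff]
    intro j hj hjm hjn
    omega
  · push Not at hle
    rw [PySem.List.pyRange_one_cons hle]
    have IH := gearInner_iff gear1 gear2 i (j0 + 1)
    simp only [gearInner]
    split_ifs with h1 h2 h3
    · refine iff_of_true rfl ?_
      intro j hj _ hn
      exact absurd hn (by omega)
    · refine iff_of_false (by simp) ?_
      intro hR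
      exact hR j0 le_rfl hle (by omega) ⟨h3 ▸ h2, h3⟩
    · have hC : ¬(PySem.List.pyGetD gear1 (i + j0) 0 = 2 ∧ PySem.List.pyGetD gear2 j0 0 = 2) :=
        fun hq => h3 hq.2
      rw [IH]
      constructor
      · intro h j hj hjm hjn hq
        rcases eq_or_lt_of_le hj with rfl | hlt
        · exact hC hq
        · exact h j (by omega) hjm hjn hq
      · intro h j hj hjm hjn
        exact h j (by omega) hjm hjn
    · have hC : ¬(PySem.List.pyGetD gear1 (i + j0) 0 = 2 ∧ PySem.List.pyGetD gear2 j0 0 = 2) :=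
        fun hq => h2 (hq.1.trans hq.2.symm)
      rw [IH]
      constructor
      · intro h j hj hjm hjn hq
        rcases eq_or_lt_of_le hj with rfl | hlt
        · exact hC hq
        · exact h j (by omega) hjm hjn hq
      · intro h j hj hjm hjn
        exact h j (by omega) hjm hjn
termination_by ((gear2.length : Int) - j0).toNat
decreasing_by omega

-- for an in-range candidate shift i, membership in bad is exactly 'A skips i'
theorem mem_gearBad_iff (gear1 gear2 : List Int) (i : Int)
    (h0 : 0 ≤ i) (hn : i < (gear1.length : Int)) :
    i ∈ gearBad gear1 gear2 ↔
      PySem.List.pyGetD gear1 i 0 = 2 ∨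
      ¬(∀ j, 1 ≤ j → j < (gear2.length : Int) → i + j < (gear1.length : Int) →
        ¬(PySem.List.pyGetD gear1 (i + j) 0 = 2 ∧ PySem.List.pyGetD gear2 j 0 = 2)) := by
  rw [mem_gearBad]
  simp only [mem_gearTwos1]
  constructor
  · rintro (⟨_, _, hv⟩ | ⟨j, h1, h2, h3, p, ⟨hp0, hpn, hpv⟩, hjp, rfl⟩)
    · exact Or.inl hv
    · refine Or.inr fun hall => hall j h1 h2 (by omega) ⟨?_, h3⟩
      rw [show p - j + j = p by ring]
      exact hpv
  · rintro (hv | hne)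
    · exact Or.inl ⟨h0, hn, hv⟩
    · push Not at hne
      obtain ⟨j, h1, h2, h3, h4⟩ := hne
      exact Or.inr ⟨j, h1, h2, h4.2, i + j, ⟨by omega, h3, h4.1⟩, by omega, by ring⟩

-- the break in A's outer loop never fires when gear2[0] is a 2
theorem gearOuter_g2head2 (gear1 gear2 : List Int)
    (hg : PySem.List.pyGetD gear2 0 0 = 2) (L : List Int) :
    gearOuter gear1 gear2 L = 10000 := by
  induction L with
  | nil => rfl
  | cons i is ih =>
    simp only [gearOuter]
    rw [if_neg (by tauto)]
    exact ih

-- the two scans agree, pointwise over any in-range list of candidate shifts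
theorem scan_eq (gear1 gear2 : List Int) (hg0 : PySem.List.pyGetD gear2 0 0 ≠ 2)
    (L : List Int) (hL : ∀ i ∈ L, 0 ≤ i ∧ i < (gear1.length : Int)) :
    gearOuter gear1 gear2 L =
      gearAltScan (gear1.length : Int) (gear2.length : Int) (gearBad gear1 gear2) L := by
  induction L with
  | nil => rfl
  | cons i is ih =>
    obtain ⟨h0, hn⟩ := hL i (List.mem_cons_self ..)
    have ih' := ih fun x hx => hL x (List.mem_cons_of_mem _ hx)
    have hmem := mem_gearBad_iff gear1 gear2 i h0 hn
    have hlen : ((PySem.List.slice gear1 (some i) none).length : Int) =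
        (gear1.length : Int) - i := by
      rw [PySem.List.slice_from _ h0]
      simp only [List.length_drop]
      omega
    simp only [gearOuter, gearAltScan]
    by_cases hb : i ∈ gearBad gear1 gear2
    · have hcont : (gearBad gear1 gear2).contains i = true := by
        simpa [PySem.Set.contains_iff] using hb
      rcases hmem.mp hb with hv | hninner
      · rw [if_neg (fun hc => hc.1 hv), if_pos hcont]
        exact ih'
      · have hfalse : gearInner gear1 gear2 i (PySem.List.pyRange 1 (gear2.length : Int) 1)
            = false := by
          rw [Bool.eq_false_iff]
          intro ht
          exact hninner ((gearInner_iff gear1 gear2 i 1).mp ht)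
        by_cases hc1 : PySem.List.pyGetD gear1 i 0 ≠ 2 ∧ PySem.List.pyGetD gear2 0 0 ≠ 2
        · rw [if_pos hc1, hfalse, if_neg (by simp), if_pos hcont]
          exact ih'
        · rw [if_neg hc1, if_pos hcont]
          exact ih'
    · have hcont : ¬ (gearBad gear1 gear2).contains i = true := by
        simpa [PySem.Set.contains_iff] using hb
      have hsplit : PySem.List.pyGetD gear1 i 0 ≠ 2 ∧
          (∀ j, 1 ≤ j → j < (gear2.length : Int) → i + j < (gear1.length : Int) →
            ¬(PySem.List.pyGetD gear1 (i + j) 0 = 2 ∧ PySem.List.pyGetD gear2 j 0 = 2)) := by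
        by_contra hcon
        rcases not_and_or.mp hcon with h | h
        · exact hb (hmem.mpr (Or.inl (by tauto)))
        · exact hb (hmem.mpr (Or.inr h))
      rw [if_pos ⟨hsplit.1, hg0⟩, if_pos ((gearInner_iff gear1 gear2 i 1).mpr hsplit.2), hlen,
        if_neg hcont]

-- ===== VERDICT (by name: the statement is the Claim_ definition above) =====
theorem gear_spec : Claim_equal_gear := by
  unfold Claim_equal_gear Spec_gear
  intro gear1 gear2 _ _
  unfold gear gear_alt
  by_cases hn : (gear1.length : Int) = 0
  · rw [if_pos (Or.inl hn), hn, PySem.List.pyRange_one_eq_nil le_rfl]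
    rfl
  · by_cases hg : 0 < (gear2.length : Int) ∧ PySem.List.pyGetD gear2 0 0 = 2
    · rw [if_pos (Or.inr hg)]
      exact gearOuter_g2head2 gear1 gear2 hg.2 _
    · rw [if_neg (by tauto)]
      have hg0 : PySem.List.pyGetD gear2 0 0 ≠ 2 := by
        rcases gear2 with _ | ⟨a, t⟩
        · simp [PySem.List.pyGetD_zero]
        · exact fun h => hg ⟨by simp, h⟩
      exact scan_eq gear1 gear2 hg0 _
        (fun i hi => PySem.List.mem_pyRange_one.mp hi)

theorem gear_raises : Claim_raises_gear := by
  unfold Claim_raises_gear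
  refine ⟨?_, by decide⟩
  rintro g1 g2 _ ⟨h2, x, hx, hne⟩ h
  rcases h with h | hall
  · exact h h2
  · exact hne (hall x hx)

-- self-check: the raise witness really lies in Raises_ and B's port returns the stated value there
theorem gear_raises_witness_ok :
    Raises_gear (pvRaiseWitness_gear.1) (pvRaiseWitness_gear.2) ∧
      gear_alt (pvRaiseWitness_gear.1) (pvRaiseWitness_gear.2) = pvRaiseWitnessOut_gear := by
  have h := gear_raises
  unfold Claim_raises_gear at h
  exact ⟨h.2.2.1, h.2.2.2⟩
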